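-- pv_equiv track=rewrite | github.com/jtannahill/art-generator | lambdas/site_rebuild/handler.py | group_by_location
-- ===== SOURCE A (Python) =====
-- from collections import defaultdict
--
-- def group_by_location(items):
--     """Groups palette items by location slug from PK (e.g. 'PALETTE#sahara' -> 'sahara').
--
--     Each location's items are sorted by date (SK) descending.
--     Returns dict of slug -> list of items.
--     """
--     groups = defaultdict(list)
--     for item in items:
--         pk = item.get("PK", "")
--         if pk.startswith("PALETTE#"):
--             slug = pk[len("PALETTE#"):]
--             groups[slug].append(item)
--
--     # Sort each location's items by SK (date) descending
--     for slug in groups: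
--         groups[slug].sort(key=lambda x: x.get("SK", ""), reverse=True)
--
--     return dict(sorted(groups.items()))
-- ===== SOURCE B (Python) =====
-- from collections import defaultdict
--
-- def group_by_location(items):
--     """Sort once, then group: one global stable SK-descending sort of the
--     palette items, a single grouping pass, then the slugs sorted."""
--     palettes = [item for item in items
--                 if item.get("PK", "").startswith("PALETTE#")]
--     palettes.sort(key=lambda x: x.get("SK", ""), reverse=True)
--     groups = defaultdict(list)
--     for item in palettes:
--         groups[item.get("PK", "")[len("PALETTE#"):]].append(item)
--     return dict(sorted(groups.items()))
-- ===== Notes on version B (the rewrite author's own statement) =====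
-- stated objective: alternative
-- what changed: A groups first and then sorts each bucket separately; B filters, performs ONE global stable sort by SK descending, and then groups in a single pass, relying on sort stability so every bucket comes out already SK-descending.
import Mathlib
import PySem

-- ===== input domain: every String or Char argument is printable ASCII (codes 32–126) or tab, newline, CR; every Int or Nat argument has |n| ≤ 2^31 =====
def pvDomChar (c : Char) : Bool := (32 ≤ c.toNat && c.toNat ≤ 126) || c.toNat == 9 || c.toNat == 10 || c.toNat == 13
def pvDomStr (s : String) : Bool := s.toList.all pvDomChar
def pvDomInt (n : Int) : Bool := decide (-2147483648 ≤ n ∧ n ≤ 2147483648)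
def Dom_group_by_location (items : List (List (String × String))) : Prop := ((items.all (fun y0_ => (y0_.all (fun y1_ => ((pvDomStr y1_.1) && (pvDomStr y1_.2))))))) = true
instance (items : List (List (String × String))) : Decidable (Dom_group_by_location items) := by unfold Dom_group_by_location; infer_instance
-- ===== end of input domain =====

-- B changes the shape 'group, then sort each bucket' into 'one global stable sort, then group';
-- same results, similar cost (objective: alternative).

-- item.get(k, "") on a dict parameter (association list, first match wins)
def pvGet (item : List (String × String)) (k : String) : String :=
  (List.lookup k item).getD ""

-- ===== PORT A =====
-- groups[slug].append(item) on a defaultdict(list) = Dict.modify slug [] (· ++ [item]);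
-- 'groups[slug].sort(key=..., reverse=True)' = in-place stable reverse sort = Dict.modify with PySem.List.sorted;
-- dict(sorted(groups.items())): the tuples have distinct first components, so Python's tuple
-- comparison only ever compares the slugs: key (fun p => p.1).
def group_by_location (items : List (List (String × String))) : List (String × List (List (String × String))) :=
  let groups : PySem.Dict String (List (List (String × String))) :=
    items.foldl (fun g item =>
      if PySem.Str.startswith (pvGet item "PK") "PALETTE#" then
        PySem.Dict.modify g (PySem.Str.slice (pvGet item "PK") (some 8) none) [] (fun l => l ++ [item])
      else g) PySem.Dict.empty
  let groups2 :=
    groups.keys.foldl (fun g slug =>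
      PySem.Dict.modify g slug [] (fun l => PySem.List.sorted l (fun x => pvGet x "SK") true)) groups
  (PySem.Dict.ofList (PySem.List.sorted groups2.items (fun p => p.1) false)).items

-- ===== PORT B =====
-- filter once, ONE global stable sort by SK descending, then a single grouping pass,
-- then dict(sorted(groups.items())) exactly as in A.
def group_by_location_alt (items : List (List (String × String))) : List (String × List (List (String × String))) :=
  let palettes := items.filter (fun item => PySem.Str.startswith (pvGet item "PK") "PALETTE#")
  let ordered := PySem.List.sorted palettes (fun x => pvGet x "SK") true
  let groups : PySem.Dict String (List (List (String × String))) :=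
    ordered.foldl (fun g item =>
      PySem.Dict.modify g (PySem.Str.slice (pvGet item "PK") (some 8) none) [] (fun l => l ++ [item])) PySem.Dict.empty
  (PySem.Dict.ofList (PySem.List.sorted groups.items (fun p => p.1) false)).items

-- ===== PRECONDITION & SPEC =====
def Spec_group_by_location (items : List (List (String × String))) (out : List (String × List (List (String × String)))) : Prop := out = group_by_location_alt items
instance (items : List (List (String × String))) (out : List (String × List (List (String × String)))) : Decidable (Spec_group_by_location items out) := by unfold Spec_group_by_location; infer_instance

-- ===== CLAIM (what is proved, stated in full; the proofs are below) =====
def Claim_equal_group_by_location : Prop := ∀ (items : List (List (String × String))), Dom_group_by_location items → Spec_group_by_location items (group_by_location items)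

-- ===== LEMMAS AND PROOFS =====

-- ---- generic association-list / Dict lemmas ----

theorem pvFind?_eq_none_iff {κ ν : Type} [BEq κ] [LawfulBEq κ] (es : List (κ × ν)) (k : κ) :
    es.find? (fun p => p.1 == k) = none ↔ k ∉ es.map (fun p => p.1) := by
  constructor
  · intro h hm
    obtain ⟨p, hp, hpk⟩ := List.mem_map.mp hm
    exact (List.find?_eq_none.mp h p hp) (by simp [hpk])
  · intro h
    apply List.find?_eq_none.mpr
    intro p hp hpk
    exact h (List.mem_map.mpr ⟨p, hp, eq_of_beq hpk⟩)

theorem pvGet?_eq_none_iff {κ ν : Type} [BEq κ] [LawfulBEq κ] (d : PySem.Dict κ ν) (k : κ) :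
    d.get? k = none ↔ k ∉ d.keys := by
  obtain ⟨es⟩ := d
  simp only [PySem.Dict.get?, PySem.Dict.keys, Option.map_eq_none_iff]
  exact pvFind?_eq_none_iff es k

theorem pvMem_iff_find? {κ ν : Type} [BEq κ] [LawfulBEq κ] (es : List (κ × ν)) (k : κ) (v : ν)
    (hnd : (es.map (fun p => p.1)).Nodup) :
    (k, v) ∈ es ↔ (es.find? (fun p => p.1 == k)).map (fun p => p.2) = some v := by
  induction es with
  | nil => simp
  | cons p es ih =>
    obtain ⟨a, b⟩ := p
    simp only [List.map_cons, List.nodup_cons] at hnd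
    obtain ⟨hp, hnd'⟩ := hnd
    by_cases hk : a = k
    · subst hk
      rw [List.find?_cons_of_pos (by simp)]
      simp only [Option.map_some, Option.some.injEq, List.mem_cons]
      constructor
      · rintro (he | he)
        · exact (Prod.mk.injEq .. ▸ he).2.symm
        · exact absurd (List.mem_map.mpr ⟨(a, v), he, rfl⟩) hp
      · intro hs
        left
        rw [hs]
    · rw [List.find?_cons_of_neg (by simp [hk])]
      rw [List.mem_cons, ← ih hnd']
      have hne : (k, v) ≠ (a, b) := by
        intro he
        exact hk (congrArg Prod.fst he).symm
      simp [hne]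

theorem pvMem_items_iff_get? {κ ν : Type} [BEq κ] [LawfulBEq κ] (d : PySem.Dict κ ν) (k : κ) (v : ν)
    (hnd : d.keys.Nodup) : (k, v) ∈ d.items ↔ d.get? k = some v := by
  obtain ⟨es⟩ := d
  simp only [PySem.Dict.keys] at hnd
  simp only [PySem.Dict.get?]
  exact pvMem_iff_find? es k v hnd

theorem pvKeys_insert_mem {κ ν : Type} [BEq κ] [LawfulBEq κ] (d : PySem.Dict κ ν) (k : κ) (v : ν)
    (h : k ∈ d.keys) : (d.insert k v).keys = d.keys := by
  obtain ⟨p, hp, hpk⟩ := List.mem_map.mp h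
  have hc : d.contains k = true := List.any_eq_true.mpr ⟨p, hp, by simp [hpk]⟩
  simp only [PySem.Dict.insert, hc, if_true, PySem.Dict.keys, List.map_map]
  apply List.map_congr_left
  intro q _
  by_cases hqk : q.1 = k <;> simp [hqk]

theorem pvKeys_insert_not_mem {κ ν : Type} [BEq κ] [LawfulBEq κ] (d : PySem.Dict κ ν) (k : κ) (v : ν)
    (h : k ∉ d.keys) : (d.insert k v).keys = d.keys ++ [k] := by
  have hc : d.contains k = false := by
    apply List.any_eq_false.mpr
    intro p hp
    have hne : p.1 ≠ k := fun hpk => h (List.mem_map.mpr ⟨p, hp, hpk⟩)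
    simp [hne]
  unfold PySem.Dict.insert
  rw [hc]
  simp [PySem.Dict.keys]

theorem pvNodup_keys_insert {κ ν : Type} [BEq κ] [LawfulBEq κ] (d : PySem.Dict κ ν) (k : κ) (v : ν)
    (h : d.keys.Nodup) : (d.insert k v).keys.Nodup := by
  by_cases hk : k ∈ d.keys
  · rw [pvKeys_insert_mem d k v hk]; exact h
  · rw [pvKeys_insert_not_mem d k v hk, List.nodup_append]
    refine ⟨h, List.nodup_singleton k, ?_⟩
    intro a ha b hb
    rw [List.mem_singleton] at hb
    subst hb
    exact fun he => hk (he ▸ ha)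

theorem pvGet?_modify {κ ν : Type} [BEq κ] [LawfulBEq κ] [DecidableEq κ]
    (d : PySem.Dict κ ν) (k k' : κ) (dflt : ν) (f : ν → ν) :
    (PySem.Dict.modify d k dflt f).get? k' = if k' = k then some (f (d.getD k dflt)) else d.get? k' := by
  simp [PySem.Dict.modify, PySem.Dict.get?_insert]

-- ---- the grouping fold ----

theorem pvGrp_get? {α κ : Type} [BEq κ] [LawfulBEq κ] [DecidableEq κ] (σ : α → κ)
    (l : List α) (d : PySem.Dict κ (List α)) (s : κ) :
    (l.foldl (fun g x => PySem.Dict.modify g (σ x) [] (fun t => t ++ [x])) d).get? s =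
      if l.filter (fun x => σ x == s) = [] then d.get? s
      else some (d.getD s [] ++ l.filter (fun x => σ x == s)) := by
  induction l generalizing d with
  | nil => simp
  | cons x l ih =>
    simp only [List.foldl_cons]
    by_cases hx : σ x = s
    · subst hx
      have hg' : (PySem.Dict.modify d (σ x) [] (fun t => t ++ [x])).get? (σ x) =
          some (d.getD (σ x) [] ++ [x]) := by
        rw [pvGet?_modify]; simp
      have hg : (PySem.Dict.modify d (σ x) [] (fun t => t ++ [x])).getD (σ x) [] =
          d.getD (σ x) [] ++ [x] := by
        simp [PySem.Dict.getD, hg']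
      have hcons : List.filter (fun y => σ y == σ x) (x :: l) =
          x :: List.filter (fun y => σ y == σ x) l := by
        rw [List.filter_cons, if_pos (by simp)]
      rw [hcons, if_neg (List.cons_ne_nil _ _), ih, hg, hg']
      split_ifs with h1
      · rw [h1]
      · simp
    · have hcons : List.filter (fun y => σ y == s) (x :: l) =
          List.filter (fun y => σ y == s) l := by
        rw [List.filter_cons, if_neg (by simp [hx])]
      have hne : s ≠ σ x := fun h => hx h.symm
      have hg' : (PySem.Dict.modify d (σ x) [] (fun t => t ++ [x])).get? s = d.get? s := by
        rw [pvGet?_modify]; simp [hne]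
      have hg : (PySem.Dict.modify d (σ x) [] (fun t => t ++ [x])).getD s [] = d.getD s [] := by
        simp [PySem.Dict.getD, hg']
      rw [hcons, ih, hg, hg']

theorem pvGrp_keys_nodup {α κ : Type} [BEq κ] [LawfulBEq κ] (σ : α → κ)
    (l : List α) (d : PySem.Dict κ (List α)) (h : d.keys.Nodup) :
    (l.foldl (fun g x => PySem.Dict.modify g (σ x) [] (fun t => t ++ [x])) d).keys.Nodup := by
  induction l generalizing d with
  | nil => exact h
  | cons x l ih =>
    simp only [List.foldl_cons]
    exact ih _ (pvNodup_keys_insert _ _ _ h)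

-- ---- the per-slug sorting loop of A ----

theorem pvLoop_get? {κ ν : Type} [BEq κ] [LawfulBEq κ] [DecidableEq κ]
    (h : ν → ν) (dflt : ν) (ks : List κ) (d : PySem.Dict κ ν) (s : κ) (hnd : ks.Nodup) :
    (ks.foldl (fun g t => PySem.Dict.modify g t dflt h) d).get? s =
      if s ∈ ks then some (h (d.getD s dflt)) else d.get? s := by
  induction ks generalizing d with
  | nil => simp
  | cons t ks ih =>
    simp only [List.nodup_cons] at hnd
    simp only [List.foldl_cons, List.mem_cons]
    rw [ih _ hnd.2]
    by_cases hst : s = t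
    · subst hst
      rw [if_neg hnd.1, pvGet?_modify]
      simp
    · have hgd : (PySem.Dict.modify d t dflt h).getD s dflt = d.getD s dflt := by
        simp [PySem.Dict.getD, pvGet?_modify, hst]
      have hg : (PySem.Dict.modify d t dflt h).get? s = d.get? s := by
        rw [pvGet?_modify]; simp [hst]
      by_cases hm : s ∈ ks <;> simp [hm, hst, hgd, hg]

theorem pvLoop_keys {κ ν : Type} [BEq κ] [LawfulBEq κ]
    (h : ν → ν) (dflt : ν) (ks : List κ) (d : PySem.Dict κ ν) (hsub : ∀ t ∈ ks, t ∈ d.keys) :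
    (ks.foldl (fun g t => PySem.Dict.modify g t dflt h) d).keys = d.keys := by
  induction ks generalizing d with
  | nil => rfl
  | cons t ks ih =>
    simp only [List.foldl_cons]
    have hk : (PySem.Dict.modify d t dflt h).keys = d.keys :=
      pvKeys_insert_mem d t _ (hsub t (List.mem_cons_self ..))
    rw [ih _ (by intro u hu; rw [hk]; exact hsub u (List.mem_cons_of_mem _ hu)), hk]

-- ---- stability: filtering commutes with the stable reverse sort ----

theorem pvInsertBy_nil {α : Type} (b : α → α → Bool) (x : α) :
    PySem.List.insertBy b x [] = [x] := rfl

theorem pvInsertBy_cons {α : Type} (b : α → α → Bool) (x y : α) (ys : List α) :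
    PySem.List.insertBy b x (y :: ys) =
      if b x y then x :: y :: ys else y :: PySem.List.insertBy b x ys := rfl

theorem pvPairwise_insertBy {α κ : Type} [LinearOrder κ] (key : α → κ) (x : α) (acc : List α)
    (h : acc.Pairwise (fun a b => key b ≤ key a)) :
    (PySem.List.insertBy (fun a b => decide (key b < key a)) x acc).Pairwise
      (fun a b => key b ≤ key a) := by
  induction acc with
  | nil => simp [pvInsertBy_nil]
  | cons y ys ih =>
    rw [pvInsertBy_cons]
    rcases List.pairwise_cons.mp h with ⟨hy, hys⟩
    split_ifs with hb
    · simp only [decide_eq_true_eq] at hb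
      refine List.pairwise_cons.mpr ⟨?_, h⟩
      intro z hz
      rcases List.mem_cons.mp hz with hz | hz
      · subst hz; exact le_of_lt hb
      · exact le_trans (hy z hz) (le_of_lt hb)
    · simp only [decide_eq_true_eq, not_lt] at hb
      refine List.pairwise_cons.mpr ⟨?_, ih hys⟩
      intro z hz
      rcases (PySem.List.mem_insertBy _ _ _ _).mp hz with hz | hz
      · subst hz; exact hb
      · exact hy z hz

theorem pvFilter_insertBy {α κ : Type} [LinearOrder κ] (key : α → κ) (p : α → Bool)
    (x : α) (acc : List α) (h : acc.Pairwise (fun a b => key b ≤ key a)) :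
    (PySem.List.insertBy (fun a b => decide (key b < key a)) x acc).filter p =
      if p x then PySem.List.insertBy (fun a b => decide (key b < key a)) x (acc.filter p)
      else acc.filter p := by
  induction acc with
  | nil => by_cases hp : p x <;> simp [pvInsertBy_nil, hp]
  | cons y ys ih =>
    rcases List.pairwise_cons.mp h with ⟨hy, hys⟩
    rw [pvInsertBy_cons]
    by_cases hp : p x
    · rw [if_pos hp]
      by_cases hb : key y < key x
      · rw [if_pos (by simpa using hb), List.filter_cons, if_pos hp]
        rcases hf : List.filter p (y :: ys) with _ | ⟨z, zs⟩
        · rw [pvInsertBy_nil]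
        · have hz : z ∈ y :: ys := by
            apply List.mem_of_mem_filter (p := p)
            rw [hf]
            exact List.mem_cons_self ..
          have hzx : key z < key x := by
            rcases List.mem_cons.mp hz with hz | hz
            · exact hz ▸ hb
            · exact lt_of_le_of_lt (hy z hz) hb
          rw [pvInsertBy_cons, if_pos (by simpa using hzx)]
      · rw [if_neg (by simpa using hb), List.filter_cons, List.filter_cons]
        by_cases hpy : p y
        · rw [if_pos hpy, if_pos hpy, ih hys, if_pos hp, pvInsertBy_cons,
            if_neg (by simpa using hb)]
        · rw [if_neg hpy, if_neg hpy, ih hys, if_pos hp]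
    · rw [if_neg hp]
      by_cases hb : key y < key x
      · rw [if_pos (by simpa using hb), List.filter_cons, if_neg hp]
      · rw [if_neg (by simpa using hb), List.filter_cons, List.filter_cons]
        by_cases hpy : p y
        · rw [if_pos hpy, if_pos hpy, ih hys, if_neg hp]
        · rw [if_neg hpy, if_neg hpy, ih hys, if_neg hp]

theorem pvFilter_foldl_insertBy {α κ : Type} [LinearOrder κ] (key : α → κ) (p : α → Bool)
    (l : List α) (acc : List α) (h : acc.Pairwise (fun a b => key b ≤ key a)) :
    (l.foldl (fun acc x => PySem.List.insertBy (fun a b => decide (key b < key a)) x acc) acc).filter p =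
      (l.filter p).foldl (fun acc x => PySem.List.insertBy (fun a b => decide (key b < key a)) x acc)
        (acc.filter p) := by
  induction l generalizing acc with
  | nil => rfl
  | cons x l ih =>
    simp only [List.foldl_cons, List.filter_cons]
    rw [ih _ (pvPairwise_insertBy key x acc h)]
    rw [pvFilter_insertBy key p x acc h]
    by_cases hp : p x <;> simp [hp]

theorem pvFilter_sorted_rev {α κ : Type} [LinearOrder κ] (key : α → κ) (p : α → Bool) (xs : List α) :
    (PySem.List.sorted xs key true).filter p = PySem.List.sorted (xs.filter p) key true := by
  rw [PySem.List.sorted_rev_eq_foldl_insertBy, PySem.List.sorted_rev_eq_foldl_insertBy]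
  simpa using pvFilter_foldl_insertBy key p xs [] (by simp)

-- ---- assembly ----

theorem group_by_location_eq (items : List (List (String × String))) :
    group_by_location items = group_by_location_alt items := by
  simp only [group_by_location, group_by_location_alt]
  rw [PySem.List.foldl_if_eq_foldl_filter
    (p := fun item => PySem.Str.startswith (pvGet item "PK") "PALETTE#")
    (f := fun g item => PySem.Dict.modify g (PySem.Str.slice (pvGet item "PK") (some 8) none) [] (fun l => l ++ [item]))]
  set σ : List (String × String) → String := fun item => PySem.Str.slice (pvGet item "PK") (some 8) none with hσ
  set sk : List (String × String) → String := fun x => pvGet x "SK" with hsk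
  set pal := items.filter (fun item => PySem.Str.startswith (pvGet item "PK") "PALETTE#") with hpal
  set gA := pal.foldl (fun g x => PySem.Dict.modify g (σ x) [] (fun t => t ++ [x])) PySem.Dict.empty with hgA
  set gA2 := gA.keys.foldl (fun g s => PySem.Dict.modify g s [] (fun l => PySem.List.sorted l sk true)) gA with hgA2
  set gB := (PySem.List.sorted pal sk true).foldl
      (fun g x => PySem.Dict.modify g (σ x) [] (fun t => t ++ [x])) PySem.Dict.empty with hgB
  -- lookups agree
  have hnA : gA.keys.Nodup := pvGrp_keys_nodup σ pal PySem.Dict.empty (by simp [PySem.Dict.empty, PySem.Dict.keys])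
  have hnB : gB.keys.Nodup := pvGrp_keys_nodup σ _ PySem.Dict.empty (by simp [PySem.Dict.empty, PySem.Dict.keys])
  have hgetA : ∀ s, gA.get? s = if pal.filter (fun x => σ x == s) = [] then none
      else some (pal.filter (fun x => σ x == s)) := by
    intro s
    rw [hgA, pvGrp_get? σ pal PySem.Dict.empty s]
    split_ifs with h1 <;> simp [PySem.Dict.empty, PySem.Dict.get?, PySem.Dict.getD]
  have hmemA : ∀ s, s ∈ gA.keys ↔ ¬ pal.filter (fun x => σ x == s) = [] := by
    intro s
    rw [← not_iff_not, not_not, ← pvGet?_eq_none_iff, hgetA s]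
    split_ifs with h1 <;> simp [h1]
  have hgetA2 : ∀ s, gA2.get? s = if pal.filter (fun x => σ x == s) = [] then none
      else some (PySem.List.sorted (pal.filter (fun x => σ x == s)) sk true) := by
    intro s
    rw [hgA2, pvLoop_get? _ _ _ _ _ hnA]
    by_cases hm : s ∈ gA.keys
    · have hf := (hmemA s).mp hm
      rw [if_pos hm, if_neg hf]
      have : gA.getD s [] = pal.filter (fun x => σ x == s) := by
        simp [PySem.Dict.getD, hgetA s, hf]
      rw [this]
    · have hf := not_not.mp (fun h => hm ((hmemA s).mpr h))
      rw [if_neg hm, if_pos hf, hgetA s, if_pos hf]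
  have hgetB : ∀ s, gB.get? s = if pal.filter (fun x => σ x == s) = [] then none
      else some (PySem.List.sorted (pal.filter (fun x => σ x == s)) sk true) := by
    intro s
    rw [hgB, pvGrp_get? σ _ PySem.Dict.empty s]
    rw [pvFilter_sorted_rev sk (fun x => σ x == s) pal]
    simp only [PySem.List.sorted_eq_nil_iff]
    split_ifs with h1
    · simp [PySem.Dict.empty, PySem.Dict.get?]
    · simp [PySem.Dict.empty, PySem.Dict.getD, PySem.Dict.get?]
  -- keys of gA2
  have hkA2 : gA2.keys = gA.keys := pvLoop_keys _ _ _ _ (fun t ht => ht)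
  have hnA2 : gA2.keys.Nodup := hkA2 ▸ hnA
  -- the two dicts have permuted item lists
  have hperm : gA2.items.Perm gB.items := by
    rw [List.perm_ext_iff_of_nodup (hnA2.of_map _) (hnB.of_map _)]
    rintro ⟨s, v⟩
    rw [pvMem_items_iff_get? _ _ _ hnA2, pvMem_items_iff_get? _ _ _ hnB, hgetA2 s, hgetB s]
  -- both results are the unique slug-sorted arrangement
  have hsortB : (PySem.List.sorted gB.items (fun p => p.1) false).Pairwise
      (fun a b => a.1 < b.1) := by
    have h1 := PySem.List.sorted_pairwise gB.items (fun p => p.1)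
    have h2 : ((PySem.List.sorted gB.items (fun p => p.1) false).map (fun p => p.1)).Nodup := by
      have := (PySem.List.sorted_perm gB.items (fun p => p.1) false).map (fun p => p.1)
      exact this.nodup_iff.mpr hnB
    rw [List.Nodup, List.pairwise_map] at h2
    exact (h1.and h2).imp (fun h => lt_of_le_of_ne h.1 h.2)
  have hmain : PySem.List.sorted gA2.items (fun p => p.1) false =
      PySem.List.sorted gB.items (fun p => p.1) false := by
    apply PySem.List.sorted_eq_of_perm_of_pairwise_lt
    · exact (PySem.List.sorted_perm gB.items (fun p => p.1) false).trans hperm.symm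
    · exact hsortB
  rw [hmain]

-- ===== VERDICT (by name: the statement is the Claim_ definition above) =====
theorem group_by_location_spec : Claim_equal_group_by_location := by
  intro items _
  unfold Spec_group_by_location
  exact group_by_location_eq items
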